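-- pv_equiv track=rewrite | github.com/whanhee97/Algorithms | Programmers/프로그래머스 스타트업 코테/t2.py | solution
-- ===== SOURCE A (Python) =====
-- def solution(t, r):
--     answer = []
--     waitingQ = []
--     nowTurn = []
--     arr = []
--     for i in range(len(t)):
--         arr.append((t[i], r[i], i))
--
--     arr.sort(key=lambda x: (x[0], x[1]))
--     maxTime = max(t)
--     for time in range(maxTime+1):
--         for a in arr:
--             if a[0] == time:
--                 waitingQ.append(a)
--         if len(waitingQ) != 0:
--             waitingQ.sort(key=lambda x: x[1])
--             answer.append(waitingQ.pop(0)[2])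
--             continue
--     waitingQ.sort(key=lambda x: x[1])
--     while waitingQ:
--         answer.append(waitingQ.pop(0)[2])
--     return answer
-- ===== SOURCE B (Python) =====
-- def solution(t, r):
--     # Group arrivals by time once; keep a pending list sorted by (r, t, i) via
--     # ordered insertion, so no per-timestep re-sort or full scan of all jobs.
--     buckets = {}
--     for i in range(len(t)):
--         buckets.setdefault(t[i], []).append((r[i], t[i], i))
--     pending = []
--     answer = []
--     for time in range(max(t) + 1):
--         for job in buckets.get(time, []):
--             lo = 0
--             while lo < len(pending) and pending[lo] < job:
--                 lo += 1
--             pending.insert(lo, job)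
--         if pending:
--             answer.append(pending.pop(0)[2])
--     while pending:
--         answer.append(pending.pop(0)[2])
--     return answer
-- ===== Notes on version B (the rewrite author's own statement) =====
-- stated objective: faster
-- what changed: A rescans the full job list and re-sorts the waiting queue at every time step; B groups arrivals by time in a dict built once and maintains one always-sorted pending list keyed (r, t, i) by ordered insertion, so each time step touches only that step's arrivals and the pending list.
import Mathlib
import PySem

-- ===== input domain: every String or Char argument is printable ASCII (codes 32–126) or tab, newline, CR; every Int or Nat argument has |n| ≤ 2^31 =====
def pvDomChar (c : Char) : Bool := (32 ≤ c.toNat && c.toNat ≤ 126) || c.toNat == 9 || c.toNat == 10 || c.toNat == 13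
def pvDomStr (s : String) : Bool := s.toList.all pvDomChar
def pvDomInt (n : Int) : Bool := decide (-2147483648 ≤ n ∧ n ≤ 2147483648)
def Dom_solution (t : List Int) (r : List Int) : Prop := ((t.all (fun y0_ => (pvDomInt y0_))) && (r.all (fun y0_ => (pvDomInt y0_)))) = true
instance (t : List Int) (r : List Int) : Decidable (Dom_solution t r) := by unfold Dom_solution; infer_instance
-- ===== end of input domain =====

-- B replaces A's per-timestep full scan of all jobs plus per-timestep re-sort of the waiting
-- queue by a one-off grouping of arrivals by time and ordered insertion into an always-sorted
-- pending list keyed (r, t, i).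

-- ===== PORT A =====
-- A's trailing `while waitingQ: answer.append(waitingQ.pop(0)[2])` drains the (sorted) list
-- front to back, i.e. appends its third components in order; ported as `.map (fun a => a.2.2)`.
def solution (t : List Int) (r : List Int) : List Int :=
  let arr := (List.range t.length).foldl
      (fun acc (i : Nat) => acc ++ [(PySem.List.pyGetD t (i : Int) 0, PySem.List.pyGetD r (i : Int) 0, (i : Int))]) []
  let arr2 := PySem.List.sorted2 arr (fun x => x.1) (fun x => x.2.1)
  let maxTime := (PySem.List.max? t (fun x => x)).getD 0
  let st := (PySem.List.pyRange 0 (maxTime + 1) 1).foldl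
      (fun (st : List Int × List (Int × Int × Int)) time =>
        let q := arr2.foldl (fun q a => if a.1 == time then q ++ [a] else q) st.2
        if q.length ≠ 0 then
          match PySem.List.sorted q (fun x => x.2.1) with
          | [] => (st.1, [])
          | h :: rest => (st.1 ++ [h.2.2], rest)
        else (st.1, q)) ([], [])
  st.1 ++ (PySem.List.sorted st.2 (fun x => x.2.1)).map (fun a => a.2.2)

-- ===== PORT B =====
-- Python tuple `<` on the (r, t, i) triples B stores.
def jobLt (a b : Int × Int × Int) : Bool :=
  a.1 < b.1 || (a.1 == b.1 && (a.2.1 < b.2.1 || (a.2.1 == b.2.1 && a.2.2 < b.2.2)))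

-- Source B's linear-scan `while lo < len(pending) and pending[lo] < job … pending.insert(lo, job)`.
def insPending (job : Int × Int × Int) : List (Int × Int × Int) → List (Int × Int × Int)
  | [] => [job]
  | h :: tl => if jobLt h job then h :: insPending job tl else job :: h :: tl

def solution_alt (t : List Int) (r : List Int) : List Int :=
  let buckets := (List.range t.length).foldl
      (fun (d : PySem.Dict Int (List (Int × Int × Int))) (i : Nat) =>
        d.modify (PySem.List.pyGetD t (i : Int) 0) []
          (· ++ [(PySem.List.pyGetD r (i : Int) 0, PySem.List.pyGetD t (i : Int) 0, (i : Int))]))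
      PySem.Dict.empty
  let maxTime := (PySem.List.max? t (fun x => x)).getD 0
  let st := (PySem.List.pyRange 0 (maxTime + 1) 1).foldl
      (fun (st : List Int × List (Int × Int × Int)) time =>
        let pending := (buckets.getD time []).foldl (fun p job => insPending job p) st.2
        match pending with
        | [] => (st.1, [])
        | h :: rest => (st.1 ++ [h.2.2], rest)) ([], [])
  st.1 ++ st.2.map (fun a => a.2.2)

-- ===== PRECONDITION & SPEC =====
-- Pre_ excludes exactly the inputs where Python A raises: max(t) raises ValueError on empty t,
-- and r[i] raises IndexError when r is shorter than t.
def Pre_solution (t : List Int) (r : List Int) : Prop := t ≠ [] ∧ t.length ≤ r.length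
instance (t : List Int) (r : List Int) : Decidable (Pre_solution t r) := by unfold Pre_solution; infer_instance
def pvWitness_solution : List Int × List Int := ([1, 0, 1], [2, 1, 1])
def Spec_solution (t : List Int) (r : List Int) (out : List Int) : Prop := out = solution_alt t r
instance (t : List Int) (r : List Int) (out : List Int) : Decidable (Spec_solution t r out) := by unfold Spec_solution; infer_instance

-- ===== CLAIM (what is proved, stated in full; the proofs are below) =====
def Claim_equal_solution : Prop := ∀ (t : List Int) (r : List Int), Dom_solution t r → Pre_solution t r → Spec_solution t r (solution t r)

-- ===== LEMMAS AND PROOFS =====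

-- The job triple type and the layout change A-triples (t, r, i) ↦ B-triples (r, t, i).
def pvPhi (a : Int × Int × Int) : Int × Int × Int := (a.2.1, a.1, a.2.2)

-- Strict lexicographic order on triples.
def pvLex (a b : Int × Int × Int) : Prop :=
  a.1 < b.1 ∨ (a.1 = b.1 ∧ (a.2.1 < b.2.1 ∨ (a.2.1 = b.2.1 ∧ a.2.2 < b.2.2)))

lemma pvLex_trans {a b c : Int × Int × Int} (h1 : pvLex a b) (h2 : pvLex b c) : pvLex a c := by
  obtain ⟨a1, a2, a3⟩ := a; obtain ⟨b1, b2, b3⟩ := b; obtain ⟨c1, c2, c3⟩ := c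
  simp only [pvLex] at *; omega

lemma pvLex_irrefl {a : Int × Int × Int} (h : pvLex a a) : False := by
  obtain ⟨a1, a2, a3⟩ := a; simp only [pvLex] at h; omega

lemma pvLex_connex {a b : Int × Int × Int} (h1 : ¬ pvLex a b) (h2 : a ≠ b) : pvLex b a := by
  obtain ⟨a1, a2, a3⟩ := a; obtain ⟨b1, b2, b3⟩ := b
  have h2' : ¬(a1 = b1 ∧ a2 = b2 ∧ a3 = b3) := by simpa [Prod.ext_iff] using h2
  simp only [pvLex, not_or] at h1 ⊢; omega

lemma pvLex_ne {a b : Int × Int × Int} (h : pvLex a b) : a ≠ b := by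
  rintro rfl; exact pvLex_irrefl h

-- ---- stability of PySem's insertion sort ----
lemma insertBy_stable {α : Type} (before : α → α → Bool) (R : α → α → Prop)
    (htr : ∀ {a b c}, R a b → R b c → R a c)
    (hb : ∀ a b, before a b = true → R a b) (x : α) :
    ∀ (acc : List α), acc.Pairwise R → (∀ y ∈ acc, before x y = false → R y x) →
      (PySem.List.insertBy before x acc).Pairwise R ∧
        (PySem.List.insertBy before x acc).Perm (x :: acc) := by
  intro acc
  induction acc with
  | nil => intro _ _; simp [PySem.List.insertBy]
  | cons y ys ih =>
    intro hacc hx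
    rw [List.pairwise_cons] at hacc
    by_cases hby : before x y = true
    · rw [PySem.List.insertBy, if_pos hby]
      refine ⟨?_, List.Perm.refl _⟩
      refine List.pairwise_cons.2 ⟨?_, List.pairwise_cons.2 ⟨hacc.1, hacc.2⟩⟩
      intro z hz
      rcases List.mem_cons.1 hz with rfl | hz
      · exact hb _ _ hby
      · exact htr (hb _ _ hby) (hacc.1 _ hz)
    · rw [PySem.List.insertBy, if_neg hby]
      have hys := ih hacc.2 (fun z hz h => hx z (List.mem_cons_of_mem _ hz) h)
      refine ⟨?_, ?_⟩
      · refine List.pairwise_cons.2 ⟨?_, hys.1⟩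
        intro z hz
        rcases List.mem_cons.1 ((hys.2.mem_iff).1 hz) with rfl | hz'
        · exact hx y List.mem_cons_self (by simpa using hby)
        · exact hacc.1 _ hz'
      · exact ((hys.2.cons y).trans (List.Perm.swap x y ys))

lemma foldl_insertBy_stable {α : Type} (before : α → α → Bool) (R : α → α → Prop)
    (htr : ∀ {a b c}, R a b → R b c → R a c)
    (hb : ∀ a b, before a b = true → R a b) :
    ∀ (L acc : List α), acc.Pairwise R →
      L.Pairwise (fun a b => before b a = false → R a b) →
      (∀ x ∈ L, ∀ y ∈ acc, before x y = false → R y x) →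
      (L.foldl (fun acc x => PySem.List.insertBy before x acc) acc).Pairwise R ∧
        (L.foldl (fun acc x => PySem.List.insertBy before x acc) acc).Perm (acc ++ L) := by
  intro L
  induction L with
  | nil => intro acc h _ _; simpa using h
  | cons x L' ih =>
    intro acc hacc hL hcross
    rw [List.pairwise_cons] at hL
    have hins := insertBy_stable before R htr hb x acc hacc
      (fun y hy h => hcross x List.mem_cons_self y hy h)
    have hcross' : ∀ z ∈ L', ∀ y ∈ PySem.List.insertBy before x acc, before z y = false → R y z := by
      intro z hz y hy h
      rcases List.mem_cons.1 ((hins.2.mem_iff).1 hy) with rfl | hy'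
      · exact hL.1 z hz h
      · exact hcross z (List.mem_cons_of_mem _ hz) y hy' h
    have := ih (PySem.List.insertBy before x acc) hins.1 hL.2 hcross'
    refine ⟨this.1, this.2.trans ?_⟩
    have h1 : (PySem.List.insertBy before x acc ++ L').Perm ((x :: acc) ++ L') :=
      hins.2.append_right L'
    have h2 : ((x :: acc) ++ L').Perm (acc ++ x :: L') := by
      simpa using (List.perm_middle (a := x) (l₁ := acc) (l₂ := L')).symm
    exact h1.trans h2

-- A's per-step sort by r: on a queue whose r-ties already sit in φ-lex order, the stable sort
-- produces the φ-lex-sorted rearrangement.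
lemma sortedR_spec (Q : List (Int × Int × Int))
    (hQ : Q.Pairwise (fun a b => a.2.1 ≤ b.2.1 → pvLex (pvPhi a) (pvPhi b))) :
    (PySem.List.sorted Q (fun x => x.2.1)).Pairwise (fun a b => pvLex (pvPhi a) (pvPhi b)) ∧
      (PySem.List.sorted Q (fun x => x.2.1)).Perm Q := by
  rw [PySem.List.sorted_eq_foldl_insertBy]
  have h := foldl_insertBy_stable (fun a b => decide (a.2.1 < b.2.1))
      (fun a b => pvLex (pvPhi a) (pvPhi b))
      (fun h1 h2 => pvLex_trans h1 h2)
      (by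
        intro a b h
        simp only [decide_eq_true_eq] at h
        exact Or.inl h)
      Q [] (List.Pairwise.nil)
      (by
        refine hQ.imp ?_
        intro a b h hfalse
        apply h
        simpa using hfalse)
      (by simp)
  simpa using h

-- A's one-off sort of arr by (t, r): with indices increasing it yields a (t, r, i)-lex sorted list.
lemma sorted2_spec (L : List (Int × Int × Int)) (hL : L.Pairwise (fun a b => a.2.2 < b.2.2)) :
    (PySem.List.sorted2 L (fun x => x.1) (fun x => x.2.1)).Pairwise pvLex ∧
      (PySem.List.sorted2 L (fun x => x.1) (fun x => x.2.1)).Perm L := by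
  have hdef : PySem.List.sorted2 L (fun x => x.1) (fun x => x.2.1) =
      L.foldl (fun acc x => PySem.List.insertBy
        (fun a b => decide (a.1 < b.1) || (!decide (b.1 < a.1) && decide (a.2.1 < b.2.1))) x acc) [] := rfl
  rw [hdef]
  have h := foldl_insertBy_stable
      (fun a b => decide (a.1 < b.1) || (!decide (b.1 < a.1) && decide (a.2.1 < b.2.1)))
      pvLex (fun h1 h2 => pvLex_trans h1 h2)
      (by
        intro a b h
        simp only [Bool.or_eq_true, Bool.and_eq_true, Bool.not_eq_true', decide_eq_true_eq,
          decide_eq_false_iff_not] at h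
        obtain ⟨a1, a2, a3⟩ := a; obtain ⟨b1, b2, b3⟩ := b
        simp only [pvLex]; simp only at h; omega)
      L [] (List.Pairwise.nil)
      (by
        refine hL.imp ?_
        intro a b hi hfalse
        simp only [Bool.or_eq_false_iff, Bool.and_eq_false_iff, Bool.not_eq_false',
          decide_eq_true_eq, decide_eq_false_iff_not] at hfalse
        obtain ⟨a1, a2, a3⟩ := a; obtain ⟨b1, b2, b3⟩ := b
        simp only [pvLex]; simp only at hfalse hi ⊢; omega)
      (by simp)
  simpa using h

-- ---- B's ordered insertion ----
lemma insPending_spec (job : Int × Int × Int) :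
    ∀ p : List (Int × Int × Int), p.Pairwise pvLex → job ∉ p →
      (insPending job p).Pairwise pvLex ∧ (insPending job p).Perm (job :: p) := by
  intro p
  induction p with
  | nil => intro _ _; simp [insPending]
  | cons h tl ih =>
    intro hp hnin
    rw [List.pairwise_cons] at hp
    by_cases hlt : jobLt h job = true
    · rw [insPending, if_pos hlt]
      have hjob : pvLex h job := by
        obtain ⟨a1, a2, a3⟩ := h; obtain ⟨b1, b2, b3⟩ := job
        simp only [jobLt, Bool.or_eq_true, Bool.and_eq_true, decide_eq_true_eq, beq_iff_eq] at hlt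
        simp only [pvLex]; omega
      have htl := ih hp.2 (fun hm => hnin (List.mem_cons_of_mem _ hm))
      refine ⟨List.pairwise_cons.2 ⟨?_, htl.1⟩, (htl.2.cons h).trans (List.Perm.swap job h tl)⟩
      intro z hz
      rcases List.mem_cons.1 ((htl.2.mem_iff).1 hz) with rfl | hz'
      · exact hjob
      · exact hp.1 _ hz'
    · rw [insPending, if_neg hlt]
      have hne : job ≠ h := fun he => hnin (he ▸ List.mem_cons_self)
      have hjh : pvLex job h := by
        apply pvLex_connex _ (Ne.symm hne)
        intro hc
        apply hlt
        obtain ⟨a1, a2, a3⟩ := h; obtain ⟨b1, b2, b3⟩ := job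
        simp only [pvLex] at hc
        simp only [jobLt, Bool.or_eq_true, Bool.and_eq_true, decide_eq_true_eq, beq_iff_eq]; omega
      refine ⟨List.pairwise_cons.2 ⟨?_, List.pairwise_cons.2 ⟨hp.1, hp.2⟩⟩, List.Perm.refl _⟩
      intro z hz
      rcases List.mem_cons.1 hz with rfl | hz'
      · exact hjh
      · exact pvLex_trans hjh (hp.1 _ hz')

lemma foldl_insPending_spec :
    ∀ (X p : List (Int × Int × Int)), p.Pairwise pvLex → (p ++ X).Nodup →
      (X.foldl (fun p j => insPending j p) p).Pairwise pvLex ∧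
        (X.foldl (fun p j => insPending j p) p).Perm (p ++ X) := by
  intro X
  induction X with
  | nil => intro p hp _; simpa using hp
  | cons x X' ih =>
    intro p hp hnd
    have hdis := List.nodup_append.1 hnd
    have hxp : x ∉ p := fun hm => hdis.2.2 x hm x List.mem_cons_self rfl
    have hins := insPending_spec x p hp hxp
    have hperm : (insPending x p ++ X').Perm (p ++ x :: X') := by
      have h1 : (insPending x p ++ X').Perm ((x :: p) ++ X') := hins.2.append_right X'
      have h2 : ((x :: p) ++ X').Perm (p ++ x :: X') := by
        simpa using (List.perm_middle (a := x) (l₁ := p) (l₂ := X')).symm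
      exact h1.trans h2
    have hnd' : (insPending x p ++ X').Nodup := hperm.nodup_iff.2 hnd
    have := ih (insPending x p) hins.1 hnd'
    exact ⟨this.1, this.2.trans hperm⟩

-- ---- named pieces of the two ports ----
def jobAOf (t r : List Int) (i : Nat) : Int × Int × Int :=
  (PySem.List.pyGetD t (i : Int) 0, PySem.List.pyGetD r (i : Int) 0, (i : Int))

def pvArr (t r : List Int) : List (Int × Int × Int) := (List.range t.length).map (jobAOf t r)

def pvArr2 (t r : List Int) : List (Int × Int × Int) :=
  PySem.List.sorted2 (pvArr t r) (fun x => x.1) (fun x => x.2.1)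

def pvBk (t r : List Int) : PySem.Dict Int (List (Int × Int × Int)) :=
  (List.range t.length).foldl
    (fun (d : PySem.Dict Int (List (Int × Int × Int))) (i : Nat) =>
      d.modify (PySem.List.pyGetD t (i : Int) 0) []
        (· ++ [(PySem.List.pyGetD r (i : Int) 0, PySem.List.pyGetD t (i : Int) 0, (i : Int))]))
    PySem.Dict.empty

def pvStepA (arr2 : List (Int × Int × Int)) (st : List Int × List (Int × Int × Int)) (time : Int) :
    List Int × List (Int × Int × Int) :=
  let q := arr2.foldl (fun q a => if a.1 == time then q ++ [a] else q) st.2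
  if q.length ≠ 0 then
    match PySem.List.sorted q (fun x => x.2.1) with
    | [] => (st.1, [])
    | h :: rest => (st.1 ++ [h.2.2], rest)
  else (st.1, q)

def pvStepB (bk : PySem.Dict Int (List (Int × Int × Int)))
    (st : List Int × List (Int × Int × Int)) (time : Int) :
    List Int × List (Int × Int × Int) :=
  let pending := (bk.getD time []).foldl (fun p job => insPending job p) st.2
  match pending with
  | [] => (st.1, [])
  | h :: rest => (st.1 ++ [h.2.2], rest)

lemma solution_eq (t r : List Int) :
    solution t r =
      (let st := (PySem.List.pyRange 0 ((PySem.List.max? t (fun x => x)).getD 0 + 1) 1).foldl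
          (pvStepA (pvArr2 t r)) ([], []);
        st.1 ++ (PySem.List.sorted st.2 (fun x => x.2.1)).map (fun a => a.2.2)) := by
  have harr : (List.range t.length).foldl
      (fun acc (i : Nat) => acc ++ [(PySem.List.pyGetD t (i : Int) 0, PySem.List.pyGetD r (i : Int) 0, (i : Int))]) []
      = pvArr t r := by
    have h := PySem.List.foldl_append_singleton_eq_map (fun i : Nat => jobAOf t r i)
      (List.range t.length) []
    rw [List.nil_append] at h
    exact h
  simp only [solution]
  simp only [harr]
  rfl

lemma solution_alt_eq (t r : List Int) :
    solution_alt t r =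
      (let st := (PySem.List.pyRange 0 ((PySem.List.max? t (fun x => x)).getD 0 + 1) 1).foldl
          (pvStepB (pvBk t r)) ([], []);
        st.1 ++ st.2.map (fun a => a.2.2)) := rfl

-- bucket contents: arrivals at time c, in index order, φ-mapped
lemma getD_pvBk (t r : List Int) (c : Int) :
    (pvBk t r).getD c [] =
      ((pvArr t r).filter (fun a => a.1 == c)).map pvPhi := by
  have h1 : pvBk t r =
      ((List.range t.length).map (fun i : Nat =>
        (PySem.List.pyGetD t (i : Int) 0, pvPhi (jobAOf t r i)))).foldl
        (fun d p => d.modify p.1 [] (· ++ [p.2])) PySem.Dict.empty := by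
    rw [List.foldl_map]
    rfl
  rw [h1, PySem.Dict.getD_foldl_modify_append, PySem.Dict.getD_empty, List.nil_append]
  rw [List.filter_map]
  rw [pvArr, List.filter_map]
  simp only [List.map_map]
  rfl

-- sortedness facts about pvArr2
lemma pvArr_pairwise (t r : List Int) : (pvArr t r).Pairwise (fun a b => a.2.2 < b.2.2) := by
  exact (List.pairwise_lt_range).map (jobAOf t r)
    (fun a b hab => by simp only [jobAOf]; exact_mod_cast hab)

lemma pvArr2_pairwise (t r : List Int) : (pvArr2 t r).Pairwise pvLex :=
  (sorted2_spec (pvArr t r) (pvArr_pairwise t r)).1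

lemma pvArr2_perm (t r : List Int) : (pvArr2 t r).Perm (pvArr t r) :=
  (sorted2_spec (pvArr t r) (pvArr_pairwise t r)).2

-- ---- the loop simulation invariant ----
def pvInv (t r : List Int) (T : Int)
    (sA sB : List Int × List (Int × Int × Int)) : Prop :=
  sB.1 = sA.1 ∧ sB.2 = sA.2.map pvPhi ∧
    sA.2.Pairwise (fun a b => pvLex (pvPhi a) (pvPhi b)) ∧
    ∀ p ∈ sA.2, p ∈ pvArr2 t r ∧ p.1 < T

lemma pvStep_sim (t r : List Int) (time : Int) (sA sB : List Int × List (Int × Int × Int))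
    (hinv : pvInv t r time sA sB) :
    pvInv t r (time + 1) (pvStepA (pvArr2 t r) sA time) (pvStepB (pvBk t r) sB time) := by
  obtain ⟨hans, hmap, hpw, hmem⟩ := hinv
  set P := sA.2 with hP
  set F := (pvArr2 t r).filter (fun a => a.1 == time) with hF
  have q_eq : (pvArr2 t r).foldl (fun q a => if a.1 == time then q ++ [a] else q) sA.2 = P ++ F :=
    PySem.List.foldl_append_if_eq_filter _ _ _
  have hFtime : ∀ a ∈ F, a.1 = time := by
    intro a ha
    have := (List.mem_filter.1 ha).2
    simpa using this
  have hFarr : ∀ a ∈ F, a ∈ pvArr2 t r := fun a ha => (List.mem_filter.1 ha).1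
  have hFpair : F.Pairwise pvLex := (pvArr2_pairwise t r).filter _
  have hQpair : (P ++ F).Pairwise (fun a b => a.2.1 ≤ b.2.1 → pvLex (pvPhi a) (pvPhi b)) := by
    rw [List.pairwise_append]
    refine ⟨hpw.imp_of_mem ?_, ?_, ?_⟩
    · intro a b _ _ h _
      exact h
    · refine hFpair.imp_of_mem ?_
      intro a b ha hb hab hle
      have h1 := hFtime a ha; have h2 := hFtime b hb
      obtain ⟨a1, a2, a3⟩ := a; obtain ⟨b1, b2, b3⟩ := b
      simp only [pvLex, pvPhi] at *; omega
    · intro a ha b hb hle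
      have h1 := (hmem a ha).2
      have h2 := hFtime b hb
      obtain ⟨a1, a2, a3⟩ := a; obtain ⟨b1, b2, b3⟩ := b
      simp only [pvLex, pvPhi] at *; omega
  have hS := sortedR_spec (P ++ F) hQpair
  set S := PySem.List.sorted (P ++ F) (fun x => x.2.1) with hSdef
  have hbucket : (pvBk t r).getD time [] = ((pvArr t r).filter (fun a => a.1 == time)).map pvPhi :=
    getD_pvBk t r time
  set F' := (pvArr t r).filter (fun a => a.1 == time) with hF'
  have hFF' : F.Perm F' := (pvArr2_perm t r).filter _
  have hPmap : (P.map pvPhi).Pairwise pvLex := List.pairwise_map.2 hpw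
  have hndP : (P.map pvPhi).Nodup := hPmap.imp (fun h => pvLex_ne h)
  have hF'pair : F'.Pairwise (fun a b => a.2.2 < b.2.2) := (pvArr_pairwise t r).filter _
  have hndB : (F'.map pvPhi).Nodup := by
    have h1 : (F'.map pvPhi).Pairwise (fun a b => a.2.2 < b.2.2) := List.pairwise_map.2 hF'pair
    exact h1.imp (fun h he => absurd (he ▸ h) (lt_irrefl _))
  have hdisj : ∀ a ∈ P.map pvPhi, ∀ b ∈ F'.map pvPhi, a ≠ b := by
    intro a ha b hb
    obtain ⟨p, hp, rfl⟩ := List.mem_map.1 ha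
    obtain ⟨f, hf, rfl⟩ := List.mem_map.1 hb
    have h1 : p.1 < time := (hmem p hp).2
    have h2 : f.1 = time := by
      have := (List.mem_filter.1 hf).2
      simpa using this
    intro he
    have := congrArg (fun x => x.2.1) he
    simp only [pvPhi] at this
    omega
  have hnodup : (P.map pvPhi ++ F'.map pvPhi).Nodup := List.nodup_append.2 ⟨hndP, hndB, hdisj⟩
  have hBfold := foldl_insPending_spec (F'.map pvPhi) (P.map pvPhi) hPmap hnodup
  have hpend_perm :
      ((F'.map pvPhi).foldl (fun p j => insPending j p) (P.map pvPhi)).Perm ((P ++ F).map pvPhi) := by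
    refine hBfold.2.trans ?_
    rw [List.map_append]
    exact List.Perm.append_left _ (hFF'.symm.map pvPhi)
  have hmapS_sorted : (S.map pvPhi).Pairwise pvLex := List.pairwise_map.2 hS.1
  have hmapS_perm : (S.map pvPhi).Perm ((P ++ F).map pvPhi) := hS.2.map pvPhi
  have hpend_eq : (F'.map pvPhi).foldl (fun p j => insPending j p) (P.map pvPhi) = S.map pvPhi :=
    (hpend_perm.trans hmapS_perm.symm).eq_of_pairwise
      (fun a b _ _ h1 h2 => (pvLex_irrefl (pvLex_trans h1 h2)).elim) hBfold.1 hmapS_sorted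
  have hmem' : ∀ p ∈ S, p ∈ pvArr2 t r ∧ p.1 < time + 1 := by
    intro p hpS
    rcases List.mem_append.1 ((hS.2.mem_iff).1 hpS) with hpP | hpF
    · exact ⟨(hmem p hpP).1, by have := (hmem p hpP).2; omega⟩
    · exact ⟨hFarr p hpF, by have := hFtime p hpF; omega⟩
  simp only [pvStepA, pvStepB, pvInv]
  rw [q_eq, hmap, hbucket, hpend_eq, ← hSdef]
  clear_value S
  rcases S with _ | ⟨h, rest⟩
  · have hq0 : P ++ F = [] := hS.2.symm.eq_nil
    rw [hq0]
    simp only [List.length_nil, ne_eq, not_true_eq_false, if_false, List.map_nil]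
    exact ⟨hans, by simp, List.Pairwise.nil, by simp⟩
  · have hlen : (P ++ F).length ≠ 0 := by
      have := hS.2.length_eq
      simp only [List.length_cons, List.length_append] at this ⊢
      omega
    rw [if_pos hlen]
    simp only [List.map_cons]
    refine ⟨?_, ?_, ?_, ?_⟩
    · rw [hans]; rfl
    · trivial
    · exact (List.pairwise_cons.1 hS.1).2
    · exact fun p hp => hmem' p (List.mem_cons_of_mem _ hp)

lemma pvLoop_inv (t r : List Int) (N : Nat) :
    pvInv t r N
      ((PySem.List.pyRange 0 (N : Int) 1).foldl (pvStepA (pvArr2 t r)) ([], []))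
      ((PySem.List.pyRange 0 (N : Int) 1).foldl (pvStepB (pvBk t r)) ([], [])) := by
  induction N with
  | zero =>
    simp [PySem.List.pyRange_one_eq_nil (by omega : (0:Int) ≤ 0), pvInv]
  | succ n ih =>
    have hsplit : PySem.List.pyRange 0 ((n + 1 : Nat) : Int) 1 =
        PySem.List.pyRange 0 (n : Int) 1 ++ [(n : Int)] := by
      push_cast
      exact PySem.List.pyRange_one_succ_right (by positivity)
    rw [hsplit, List.foldl_append, List.foldl_append]
    simp only [List.foldl_cons, List.foldl_nil]
    have := pvStep_sim t r (n : Int) _ _ ih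
    simpa using this

lemma pvRange_toNat (m : Int) :
    PySem.List.pyRange 0 m 1 = PySem.List.pyRange 0 (m.toNat : Int) 1 := by
  by_cases h : 0 ≤ m
  · rw [Int.toNat_of_nonneg h]
  · rw [PySem.List.pyRange_one_eq_nil (by omega), PySem.List.pyRange_one_eq_nil (by omega)]

lemma pv_main (t r : List Int) : solution t r = solution_alt t r := by
  rw [solution_eq, solution_alt_eq]
  set m := (PySem.List.max? t (fun x => x)).getD 0 + 1 with hm
  have hinv := pvLoop_inv t r m.toNat
  rw [← pvRange_toNat] at hinv
  obtain ⟨hans, hmap, hpw, _⟩ := hinv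
  set sA := (PySem.List.pyRange 0 m 1).foldl (pvStepA (pvArr2 t r)) ([], [])
  set sB := (PySem.List.pyRange 0 m 1).foldl (pvStepB (pvBk t r)) ([], [])
  simp only [hans, hmap]
  have hsorted : PySem.List.sorted sA.2 (fun x => x.2.1) = sA.2 := by
    apply PySem.List.sorted_eq_self_of_pairwise
    refine hpw.imp ?_
    intro a b h
    rcases h with h | ⟨h, _⟩
    · exact le_of_lt h
    · exact le_of_eq h
  rw [hsorted, List.map_map]
  rfl

-- ===== VERDICT (by name: the statement is the Claim_ definition above) =====
theorem solution_spec : Claim_equal_solution := by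
  intro t r _ _
  unfold Spec_solution
  exact pv_main t r
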